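-- pv_equiv track=rewrite | github.com/ognjhunt/BlueprintValidation | src/blueprint_validation/evaluation/task_hints.py | _interleave_task_groups
-- ===== SOURCE A (Python) =====
-- from typing import Dict, List
--
-- def _interleave_task_groups(groups: List[List[str]]) -> List[str]:
--     out: List[str] = []
--     idx = 0
--     while True:
--         added = False
--         for group in groups:
--             if idx < len(group):
--                 out.append(group[idx])
--                 added = True
--         if not added:
--             break
--         idx += 1
--     return out
-- ===== SOURCE B (Python) =====
-- from typing import List
--
-- def _interleave_task_groups(groups: List[List[str]]) -> List[str]:
--     buckets: List[List[str]] = []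
--     for g in groups:
--         for i, x in enumerate(g):
--             if i < len(buckets):
--                 buckets[i].append(x)
--             else:
--                 buckets.append([x])
--     out: List[str] = []
--     for b in buckets:
--         out.extend(b)
--     return out
-- ===== Notes on version B (the rewrite author's own statement) =====
-- stated objective: alternative
-- what changed: B makes a single pass over the groups, appending each element into a per-index bucket list (buckets[i] collects the i-th elements in group order) and then flattens the buckets, instead of A's outer while-loop that rescans every group once per index round.
import Mathlib
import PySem

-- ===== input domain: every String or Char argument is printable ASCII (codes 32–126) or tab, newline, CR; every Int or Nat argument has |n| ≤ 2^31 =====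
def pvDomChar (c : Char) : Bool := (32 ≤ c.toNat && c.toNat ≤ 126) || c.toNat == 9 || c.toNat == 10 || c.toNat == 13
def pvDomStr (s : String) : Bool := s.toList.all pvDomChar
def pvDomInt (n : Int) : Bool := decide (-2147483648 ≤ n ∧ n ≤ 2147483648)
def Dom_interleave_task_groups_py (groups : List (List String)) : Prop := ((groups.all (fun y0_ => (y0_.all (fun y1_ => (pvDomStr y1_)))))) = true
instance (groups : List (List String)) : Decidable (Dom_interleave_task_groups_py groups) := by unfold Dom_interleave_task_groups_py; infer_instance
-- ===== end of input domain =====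

-- B builds per-index buckets in one pass over the groups and flattens them, instead of A's
-- repeated round-robin scans of all groups for each index.

-- ===== PORT A =====
-- max of the group lengths; used only as a termination measure of A's while-loop
def pvMaxLen (groups : List (List String)) : Nat :=
  groups.foldl (fun m g => max m g.length) 0

theorem pvFold_le_init (gs : List (List String)) (a : Nat) :
    a ≤ gs.foldl (fun m g => max m g.length) a := by
  induction gs generalizing a with
  | nil => simp
  | cons x xs ih =>
    simpa using le_trans (le_max_left a x.length) (ih (max a x.length))

theorem pvFold_mono (gs : List (List String)) {a b : Nat} (h : a ≤ b) :
    gs.foldl (fun m g => max m g.length) a ≤ gs.foldl (fun m g => max m g.length) b := by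
  induction gs generalizing a b with
  | nil => simpa using h
  | cons x xs ih =>
    simpa using ih (max_le_max_right x.length h)

theorem pvMaxLen_le {g : List String} {gs : List (List String)} (h : g ∈ gs) :
    g.length ≤ pvMaxLen gs := by
  unfold pvMaxLen
  induction gs with
  | nil => cases h
  | cons x xs ih =>
    rcases List.mem_cons.mp h with h | h
    · subst h
      simpa using le_trans (le_max_right 0 g.length) (pvFold_le_init xs _)
    · simpa using le_trans (ih h) (pvFold_mono xs (Nat.zero_le _))

-- one pass of A's inner 'for group in groups' loop (the elements appended to out for a fixed idx)
def pvRowA (groups : List (List String)) (idx : Nat) : List String :=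
  groups.foldl (fun acc g => if idx < g.length then acc ++ [g.getD idx ""] else acc) []

theorem pvRowA_eq (groups : List (List String)) (idx : Nat) :
    pvRowA groups idx
      = (groups.filter (fun g => idx < g.length)).map (fun g => g.getD idx "") := by
  unfold pvRowA
  suffices H : ∀ acc : List String,
      groups.foldl (fun acc g => if idx < g.length then acc ++ [g.getD idx ""] else acc) acc
        = acc ++ (groups.filter (fun g => idx < g.length)).map (fun g => g.getD idx "") by
    simpa using H []
  induction groups with
  | nil => simp
  | cons x xs ih =>
    intro acc
    by_cases hx : idx < x.length
    · simp only [List.foldl_cons, if_pos hx]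
      rw [ih]
      simp [hx]
    · simp only [List.foldl_cons, if_neg hx]
      rw [ih]
      simp [hx]

theorem pvRowA_lt {groups : List (List String)} {idx : Nat}
    (h : pvRowA groups idx ≠ []) : idx < pvMaxLen groups := by
  rw [pvRowA_eq] at h
  have hf : groups.filter (fun g => idx < g.length) ≠ [] := by
    intro hf; exact h (by simp [hf])
  obtain ⟨g, hg⟩ := List.exists_mem_of_ne_nil _ hf
  have hm := List.mem_filter.mp hg
  have h1 := pvMaxLen_le hm.1
  have h2 := of_decide_eq_true hm.2
  omega

-- A's 'while True' loop; 'added' is the flag 'pvRowA groups idx ≠ []'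
def pvLoopA (groups : List (List String)) (idx : Nat) : List String :=
  if _h : pvRowA groups idx = [] then []
  else pvRowA groups idx ++ pvLoopA groups (idx + 1)
termination_by pvMaxLen groups + 1 - idx
decreasing_by
  have := pvRowA_lt _h
  omega

def interleave_task_groups_py (groups : List (List String)) : List String :=
  pvLoopA groups 0

-- ===== PORT B =====
-- B's inner 'for i, x in enumerate(g)' loop: append x to buckets[i], or start a new bucket.
-- The enumerate index is always ≥ 0, so '.toNat' on it is exact.
def pvAddGroup (buckets : List (List String)) (g : List String) : List (List String) :=
  (PySem.List.enumerate g 0).foldl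
    (fun bs ix =>
      if ix.1 < (bs.length : Int) then bs.modify ix.1.toNat (fun b => b ++ [ix.2])
      else bs ++ [[ix.2]]) buckets

-- 'for g in groups: …' then 'for b in buckets: out.extend(b)'
def interleave_task_groups_py_alt (groups : List (List String)) : List String :=
  (groups.foldl pvAddGroup []).foldl (fun out b => out ++ b) []

-- ===== PRECONDITION & SPEC =====
def Spec_interleave_task_groups_py (groups : List (List String)) (out : List String) : Prop := out = interleave_task_groups_py_alt groups
instance (groups : List (List String)) (out : List String) : Decidable (Spec_interleave_task_groups_py groups out) := by unfold Spec_interleave_task_groups_py; infer_instance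

-- ===== CLAIM (what is proved, stated in full; the proofs are below) =====
def Claim_equal_interleave_task_groups_py : Prop := ∀ (groups : List (List String)), Dom_interleave_task_groups_py groups → Spec_interleave_task_groups_py groups (interleave_task_groups_py groups)

-- ===== LEMMAS AND PROOFS =====
theorem pvFold_eq_max (gs : List (List String)) :
    ∀ a : Nat, gs.foldl (fun m g => max m g.length) a = max a (pvMaxLen gs) := by
  induction gs with
  | nil => intro a; simp [pvMaxLen]
  | cons x xs ih =>
    intro a
    simp only [pvMaxLen, List.foldl_cons] at *
    rw [ih (max a x.length), ih (max 0 x.length)]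
    omega

theorem pvMaxLen_cons (x : List String) (xs : List (List String)) :
    pvMaxLen (x :: xs) = max x.length (pvMaxLen xs) := by
  conv_lhs => simp only [pvMaxLen, List.foldl_cons]
  rw [pvFold_eq_max]
  omega

theorem pvMaxLen_le_iff (gs : List (List String)) (i : Nat) :
    pvMaxLen gs ≤ i ↔ ∀ g ∈ gs, g.length ≤ i := by
  induction gs with
  | nil => simp [pvMaxLen]
  | cons x xs ih =>
    rw [pvMaxLen_cons]
    constructor
    · intro h g hg
      rcases List.mem_cons.mp hg with h' | h'
      · subst h'; omega
      · have := (ih.mp (by omega)) g h'; omega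
    · intro h
      have h1 := h x (List.mem_cons_self)
      have h2 := ih.mpr (fun g hg => h g (List.mem_cons_of_mem _ hg))
      omega

theorem pvRowA_nil_iff (gs : List (List String)) (i : Nat) :
    pvRowA gs i = [] ↔ pvMaxLen gs ≤ i := by
  rw [pvRowA_eq, pvMaxLen_le_iff, List.map_eq_nil_iff, List.filter_eq_nil_iff]
  constructor
  · intro h g hg
    have := h g hg
    simp at this
    omega
  · intro h g hg
    have := h g hg
    simp
    omega

theorem pvMaxLen_append (gs : List (List String)) (g : List String) :
    pvMaxLen (gs ++ [g]) = max (pvMaxLen gs) g.length := by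
  simp [pvMaxLen, List.foldl_append]

theorem pvRowA_append (gs : List (List String)) (g : List String) (i : Nat) :
    pvRowA (gs ++ [g]) i
      = pvRowA gs i ++ (if i < g.length then [g.getD i ""] else []) := by
  rw [pvRowA_eq, pvRowA_eq, List.filter_append, List.map_append]
  by_cases h : i < g.length <;> simp [h]

-- shifting the enumerate start by one lets the fold skip the head bucket
theorem pvAdd_shift (g : List String) :
    ∀ (s : Nat) (h : List String) (t : List (List String)),
    (PySem.List.enumerate g ((s : Int) + 1)).foldl
      (fun bs ix =>
        if ix.1 < (bs.length : Int) then bs.modify ix.1.toNat (fun b => b ++ [ix.2])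
        else bs ++ [[ix.2]]) (h :: t)
    = h :: (PySem.List.enumerate g (s : Int)).foldl
      (fun bs ix =>
        if ix.1 < (bs.length : Int) then bs.modify ix.1.toNat (fun b => b ++ [ix.2])
        else bs ++ [[ix.2]]) t := by
  induction g with
  | nil => intro s h t; simp [PySem.List.enumerate_nil]
  | cons x g ih =>
    intro s h t
    rw [PySem.List.enumerate_cons, PySem.List.enumerate_cons]
    simp only [List.foldl_cons]
    have hstep :
        (if ((s : Int) + 1) < ((h :: t).length : Int) then
            (h :: t).modify ((s : Int) + 1).toNat (fun b => b ++ [x])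
          else (h :: t) ++ [[x]])
        = h :: (if (s : Int) < (t.length : Int) then t.modify ((s : Int)).toNat (fun b => b ++ [x])
          else t ++ [[x]]) := by
      by_cases hs : s < t.length
      · rw [if_pos (by simp only [List.length_cons]; push_cast; omega), if_pos (by omega)]
        have : ((s : Int) + 1).toNat = ((s : Int)).toNat + 1 := by omega
        rw [this]
        simp [List.modify]
      · rw [if_neg (by simp only [List.length_cons]; push_cast; omega), if_neg (by omega)]
        simp
    rw [hstep]
    have := ih (s + 1) h (if (s : Int) < (t.length : Int) then t.modify ((s : Int)).toNat (fun b => b ++ [x]) else t ++ [[x]])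
    push_cast at this ⊢
    rw [this]

theorem pvAddGroup_nil_right (bs : List (List String)) : pvAddGroup bs [] = bs := by
  simp [pvAddGroup, PySem.List.enumerate_nil]

theorem pvAddGroup_nil_cons (x : String) (g : List String) :
    pvAddGroup [] (x :: g) = [x] :: pvAddGroup [] g := by
  unfold pvAddGroup
  rw [PySem.List.enumerate_cons]
  simp only [List.foldl_cons]
  have hstep : (if (0 : Int) < (([] : List (List String)).length : Int) then
      ([] : List (List String)).modify (0 : Int).toNat (fun b => b ++ [x]) else [] ++ [[x]]) = [[x]] := by
    simp
  rw [hstep]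
  have := pvAdd_shift g 0 [x] []
  simpa using this

theorem pvAddGroup_cons_cons (b : List String) (bs : List (List String)) (x : String) (g : List String) :
    pvAddGroup (b :: bs) (x :: g) = (b ++ [x]) :: pvAddGroup bs g := by
  unfold pvAddGroup
  rw [PySem.List.enumerate_cons]
  simp only [List.foldl_cons]
  have hstep : (if (0 : Int) < ((b :: bs).length : Int) then
      (b :: bs).modify (0 : Int).toNat (fun b' => b' ++ [x]) else (b :: bs) ++ [[x]])
      = (b ++ [x]) :: bs := by
    rw [if_pos (by simp only [List.length_cons]; push_cast; omega)]
    simp [List.modify]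
  rw [hstep]
  have := pvAdd_shift g 0 (b ++ [x]) bs
  simpa using this

theorem pvMerge_lemma (g : List String) :
    ∀ (m : Nat) (r : Nat → List String),
    pvAddGroup ((List.range m).map r) g
      = (List.range (max m g.length)).map
          (fun i => (if i < m then r i else []) ++ (if i < g.length then [g.getD i ""] else [])) := by
  induction g with
  | nil =>
    intro m r
    rw [pvAddGroup_nil_right]
    simp only [List.length_nil, Nat.max_zero]
    apply List.map_congr_left
    intro i hi
    have := List.mem_range.mp hi
    simp [this]
  | cons x g ih =>
    intro m r
    cases m with
    | zero =>
      simp only [List.range_zero, List.map_nil]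
      rw [pvAddGroup_nil_cons]
      have ih0 := ih 0 r
      simp only [List.range_zero, List.map_nil, Nat.zero_max] at ih0
      rw [ih0]
      simp only [Nat.zero_max, List.length_cons, List.range_succ_eq_map, List.map_cons, List.map_map]
      congr 1
      simp
    | succ k =>
      rw [List.range_succ_eq_map, List.map_cons, List.map_map,
        pvAddGroup_cons_cons]
      have ihk := ih k (r ∘ Nat.succ)
      rw [ihk]
      have hmax : max (k + 1) (x :: g).length = (max k g.length) + 1 := by
        simp only [List.length_cons]; omega
      rw [hmax, List.range_succ_eq_map, List.map_cons, List.map_map]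
      congr 1
      simp

theorem pvBuckets_eq (gs : List (List String)) :
    gs.foldl pvAddGroup [] = (List.range (pvMaxLen gs)).map (pvRowA gs) := by
  induction gs using List.reverseRecOn with
  | nil => simp [pvMaxLen]
  | append_singleton gs g ih =>
    rw [List.foldl_append, List.foldl_cons, List.foldl_nil, ih,
      pvMerge_lemma, pvMaxLen_append]
    apply List.map_congr_left
    intro i hi
    rw [pvRowA_append]
    by_cases him : i < pvMaxLen gs
    · rw [if_pos him]
    · rw [if_neg him, (pvRowA_nil_iff gs i).mpr (by omega)]

theorem pvFoldl_append_eq_flatten (ls : List (List String)) :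
    ∀ acc : List String, ls.foldl (fun out b => out ++ b) acc = acc ++ ls.flatten := by
  induction ls with
  | nil => simp
  | cons x xs ih => intro acc; simp [ih]

theorem pvLoopA_eq (gs : List (List String)) :
    ∀ (n idx : Nat), pvMaxLen gs - idx ≤ n →
    pvLoopA gs idx = ((List.range' idx (pvMaxLen gs - idx)).map (pvRowA gs)).flatten := by
  intro n
  induction n with
  | zero =>
    intro idx hn
    have h0 : pvMaxLen gs - idx = 0 := by omega
    rw [pvLoopA.eq_def, dif_pos ((pvRowA_nil_iff gs idx).mpr (by omega)), h0]
    simp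
  | succ n ih =>
    intro idx hn
    rw [pvLoopA.eq_def]
    by_cases h : pvRowA gs idx = []
    · have := (pvRowA_nil_iff gs idx).mp h
      rw [dif_pos h]
      have h0 : pvMaxLen gs - idx = 0 := by omega
      rw [h0]; simp
    · have hlt := pvRowA_lt h
      rw [dif_neg h, ih (idx + 1) (by omega)]
      have h1 : pvMaxLen gs - idx = (pvMaxLen gs - (idx + 1)) + 1 := by omega
      rw [h1, List.range'_succ]
      simp

-- ===== VERDICT (by name: the statement is the Claim_ definition above) =====
theorem interleave_task_groups_py_spec : Claim_equal_interleave_task_groups_py := by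
  intro groups _
  unfold Spec_interleave_task_groups_py interleave_task_groups_py interleave_task_groups_py_alt
  rw [pvLoopA_eq groups (pvMaxLen groups) 0 (by omega), pvBuckets_eq,
    pvFoldl_append_eq_flatten]
  simp [List.range_eq_range']
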